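-- pv_equiv track=rewrite | github.com/raulpenaguiao/project-euler | problems_code/Euler02__/Euler212/Euler212.py | AreConnected
-- ===== SOURCE A (Python) =====
-- def IsInCube(P, C):
--     if not(C[0][0] <= P[0] <= C[0][0] + C[1][0]):
--         return False
--     if not(C[0][1] <= P[1] <= C[0][1] + C[1][1]):
--         return False
--     if not(C[0][2] <= P[2] <= C[0][2] + C[1][2]):
--         return False
--     return True
--
-- def CubeVertices(C):
--     ans = []
--     ans.append([C[0][0], C[0][1], C[0][2]])
--     ans.append([C[0][0] + C[1][0], C[0][1], C[0][2]])
--     ans.append([C[0][0], C[0][1] + C[1][1], C[0][2]])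
--     ans.append([C[0][0] + C[1][0], C[0][1] + C[1][1], C[0][2]])
--     ans.append([C[0][0], C[0][1], C[0][2] + C[1][2]])
--     ans.append([C[0][0] + C[1][0], C[0][1], C[0][2] + C[1][2]])
--     ans.append([C[0][0], C[0][1] + C[1][1], C[0][2] + C[1][2]])
--     ans.append([C[0][0] + C[1][0], C[0][1] + C[1][1], C[0][2] + C[1][2]])
--     return ans
--
-- def AreConnected(C1, C2):
--     for P in CubeVertices(C1):
--         if IsInCube(P, C2):
--             return True
--     for P in CubeVertices(C2):
--         if IsInCube(P, C1):
--             return True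
--     return False
-- ===== SOURCE B (Python) =====
-- def _corner_in(X, Y):
--     # True iff some vertex of cube X lies inside cube Y: the per-axis endpoint
--     # choices are independent, so test each axis separately.
--     return all(
--         any(Y[0][i] <= e <= Y[0][i] + Y[1][i] for e in (X[0][i], X[0][i] + X[1][i]))
--         for i in range(3)
--     )
--
-- def AreConnected(C1, C2):
--     return _corner_in(C1, C2) or _corner_in(C2, C1)
-- ===== Notes on version B (the rewrite author's own statement) =====
-- stated objective: simpler
-- what changed: Replaces the 8-vertex enumeration plus per-point cube-membership test by a per-axis factored test: for each axis, check whether one of the two endpoints lies in the other cube's interval, using independence of the axis choices.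
import Mathlib
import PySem

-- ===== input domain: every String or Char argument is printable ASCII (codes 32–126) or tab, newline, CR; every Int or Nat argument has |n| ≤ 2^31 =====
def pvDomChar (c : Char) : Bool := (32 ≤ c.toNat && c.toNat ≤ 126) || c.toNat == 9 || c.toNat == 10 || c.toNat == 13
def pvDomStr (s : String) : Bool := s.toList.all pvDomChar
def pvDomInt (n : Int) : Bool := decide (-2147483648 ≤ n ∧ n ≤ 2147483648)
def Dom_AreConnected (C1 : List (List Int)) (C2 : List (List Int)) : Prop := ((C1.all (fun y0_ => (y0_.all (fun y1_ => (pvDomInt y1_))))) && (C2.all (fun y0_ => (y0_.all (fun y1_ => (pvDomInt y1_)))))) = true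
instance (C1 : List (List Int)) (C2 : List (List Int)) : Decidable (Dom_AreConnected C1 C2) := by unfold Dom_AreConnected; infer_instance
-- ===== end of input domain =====

-- B replaces A's 8-vertex enumeration by a per-axis endpoint test (simpler; same comparisons factored).

-- in-range element access C[i][j]; inside Pre_AreConnected every access is in range, so this equals Python's C[i][j]
def pvIdx2 (C : List (List Int)) (i j : Nat) : Int := (C.getD i []).getD j 0

-- ===== PORT A =====
def IsInCube (P : List Int) (C : List (List Int)) : Bool :=
  if ¬ (pvIdx2 C 0 0 ≤ P.getD 0 0 ∧ P.getD 0 0 ≤ pvIdx2 C 0 0 + pvIdx2 C 1 0) then false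
  else if ¬ (pvIdx2 C 0 1 ≤ P.getD 1 0 ∧ P.getD 1 0 ≤ pvIdx2 C 0 1 + pvIdx2 C 1 1) then false
  else if ¬ (pvIdx2 C 0 2 ≤ P.getD 2 0 ∧ P.getD 2 0 ≤ pvIdx2 C 0 2 + pvIdx2 C 1 2) then false
  else true

def CubeVertices (C : List (List Int)) : List (List Int) :=
  [ [pvIdx2 C 0 0, pvIdx2 C 0 1, pvIdx2 C 0 2],
    [pvIdx2 C 0 0 + pvIdx2 C 1 0, pvIdx2 C 0 1, pvIdx2 C 0 2],
    [pvIdx2 C 0 0, pvIdx2 C 0 1 + pvIdx2 C 1 1, pvIdx2 C 0 2],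
    [pvIdx2 C 0 0 + pvIdx2 C 1 0, pvIdx2 C 0 1 + pvIdx2 C 1 1, pvIdx2 C 0 2],
    [pvIdx2 C 0 0, pvIdx2 C 0 1, pvIdx2 C 0 2 + pvIdx2 C 1 2],
    [pvIdx2 C 0 0 + pvIdx2 C 1 0, pvIdx2 C 0 1, pvIdx2 C 0 2 + pvIdx2 C 1 2],
    [pvIdx2 C 0 0, pvIdx2 C 0 1 + pvIdx2 C 1 1, pvIdx2 C 0 2 + pvIdx2 C 1 2],
    [pvIdx2 C 0 0 + pvIdx2 C 1 0, pvIdx2 C 0 1 + pvIdx2 C 1 1, pvIdx2 C 0 2 + pvIdx2 C 1 2] ]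

def AreConnected (C1 : List (List Int)) (C2 : List (List Int)) : Bool :=
  if (CubeVertices C1).any (fun P => IsInCube P C2) then true
  else if (CubeVertices C2).any (fun P => IsInCube P C1) then true
  else false

-- ===== PORT B =====
def cornerIn (X Y : List (List Int)) : Bool :=
  (List.range 3).all (fun i =>
    [pvIdx2 X 0 i, pvIdx2 X 0 i + pvIdx2 X 1 i].any (fun e =>
      decide (pvIdx2 Y 0 i ≤ e ∧ e ≤ pvIdx2 Y 0 i + pvIdx2 Y 1 i)))

def AreConnected_alt (C1 : List (List Int)) (C2 : List (List Int)) : Bool :=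
  cornerIn C1 C2 || cornerIn C2 C1

-- ===== PRECONDITION & SPEC =====
-- Pre_ excludes exactly the inputs on which A raises IndexError (a cube must have
-- a 3-entry origin row and a 3-entry size row).
def Pre_AreConnected (C1 : List (List Int)) (C2 : List (List Int)) : Prop :=
  2 ≤ C1.length ∧ 3 ≤ (C1.getD 0 []).length ∧ 3 ≤ (C1.getD 1 []).length ∧
  2 ≤ C2.length ∧ 3 ≤ (C2.getD 0 []).length ∧ 3 ≤ (C2.getD 1 []).length
instance (C1 : List (List Int)) (C2 : List (List Int)) : Decidable (Pre_AreConnected C1 C2) := by unfold Pre_AreConnected; infer_instance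

def pvWitness_AreConnected : List (List Int) × List (List Int) :=
  ([[0, 0, 0], [1, 1, 1]], [[1, 0, 0], [2, 2, 2]])

def Spec_AreConnected (C1 : List (List Int)) (C2 : List (List Int)) (out : Bool) : Prop := out = AreConnected_alt C1 C2
instance (C1 : List (List Int)) (C2 : List (List Int)) (out : Bool) : Decidable (Spec_AreConnected C1 C2 out) := by unfold Spec_AreConnected; infer_instance

-- ===== CLAIM (what is proved, stated in full; the proofs are below) =====
def Claim_equal_AreConnected : Prop := ∀ (C1 : List (List Int)) (C2 : List (List Int)), Dom_AreConnected C1 C2 → Pre_AreConnected C1 C2 → Spec_AreConnected C1 C2 (AreConnected C1 C2)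

-- ===== LEMMAS AND PROOFS =====

-- IsInCube as a conjunction of its three axis tests
theorem isInCube_eq (P : List Int) (C : List (List Int)) :
    IsInCube P C =
      (decide (pvIdx2 C 0 0 ≤ P.getD 0 0 ∧ P.getD 0 0 ≤ pvIdx2 C 0 0 + pvIdx2 C 1 0) &&
       decide (pvIdx2 C 0 1 ≤ P.getD 1 0 ∧ P.getD 1 0 ≤ pvIdx2 C 0 1 + pvIdx2 C 1 1) &&
       decide (pvIdx2 C 0 2 ≤ P.getD 2 0 ∧ P.getD 2 0 ≤ pvIdx2 C 0 2 + pvIdx2 C 1 2)) := by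
  unfold IsInCube
  split_ifs with h1 h2 h3 <;> simp_all

-- the purely propositional core: the 8-way disjunction factors per axis
theorem eight_or_factor (a0 b0 a1 b1 a2 b2 : Bool) :
    (a0 && a1 && a2 || (b0 && a1 && a2 || (a0 && b1 && a2 || (b0 && b1 && a2 ||
     (a0 && a1 && b2 || (b0 && a1 && b2 || (a0 && b1 && b2 || b0 && b1 && b2))))))) =
    ((a0 || b0) && ((a1 || b1) && (a2 || b2))) := by
  cases a0 <;> cases b0 <;> cases a1 <;> cases b1 <;> cases a2 <;> cases b2 <;> rfl

-- the one-direction agreement: "some vertex of X lies in Y" = per-axis factored test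
theorem any_vertex_eq_cornerIn (X Y : List (List Int)) :
    (CubeVertices X).any (fun P => IsInCube P Y) = cornerIn X Y := by
  simp only [CubeVertices, List.any_cons, List.any_nil, isInCube_eq,
    List.getD_cons_zero, List.getD_cons_succ, Bool.or_false, cornerIn,
    List.range_succ, List.range_zero, List.nil_append, List.cons_append,
    List.all_cons, List.all_nil, Bool.and_true]
  exact eight_or_factor _ _ _ _ _ _
-- ===== VERDICT (by name: the statement is the Claim_ definition above) =====
theorem AreConnected_spec : Claim_equal_AreConnected := by
  intro C1 C2 _ _
  unfold Spec_AreConnected AreConnected AreConnected_alt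
  rw [any_vertex_eq_cornerIn, any_vertex_eq_cornerIn]
  by_cases h1 : cornerIn C1 C2 = true <;> by_cases h2 : cornerIn C2 C1 = true <;>
    simp [h1, h2]
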